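-- pv_equiv track=rewrite | github.com/KaninWithRice/The-Vigenere-Cipher | The-Vigenere-Cipher.py | input_key
-- ===== SOURCE A (Python) =====
-- def input_key(message, key):
--     out_key = ''
--     x = 0
--     for ltr in message:
--         if ltr.isalpha():
--             out_key += key[x % len(key)]
--             x += 1
--         else:
--             out_key += ' '
--     return out_key
-- ===== SOURCE B (Python) =====
-- def input_key(message, key):
--     # scatter approach: list the indices of the alphabetic characters, start from an
--     # all-spaces template, and overwrite the alpha positions with a repeated key stream
--     positions = [i for i, ch in enumerate(message) if ch.isalpha()]
--     out = [' '] * len(message)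
--     if positions:
--         reps = -(-len(positions) // len(key))   # ceil; raises ZeroDivisionError on empty key
--         for pos, kc in zip(positions, key * reps):
--             out[pos] = kc
--     return ''.join(out)
-- ===== Notes on version B (the rewrite author's own statement) =====
-- stated objective: alternative
-- what changed: B no longer emits the output left-to-right with a per-character branch and key cursor: it collects the indices of the alphabetic characters, allocates an all-spaces template, and scatter-writes a ceil-repeated key stream into those indices by random-access assignment.
import Mathlib
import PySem

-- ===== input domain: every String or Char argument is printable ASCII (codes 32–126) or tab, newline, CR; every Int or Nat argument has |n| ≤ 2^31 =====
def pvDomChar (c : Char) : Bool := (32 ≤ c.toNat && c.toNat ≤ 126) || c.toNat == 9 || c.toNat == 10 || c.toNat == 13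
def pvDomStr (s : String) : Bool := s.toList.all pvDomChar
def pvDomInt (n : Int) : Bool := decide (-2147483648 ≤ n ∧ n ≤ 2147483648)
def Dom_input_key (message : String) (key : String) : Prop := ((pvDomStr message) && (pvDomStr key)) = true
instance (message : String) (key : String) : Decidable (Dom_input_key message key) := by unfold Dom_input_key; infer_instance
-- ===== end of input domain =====

-- B collects the alphabetic indices, allocates an all-spaces template, and scatter-writes a
-- ceil-repeated key stream into those indices, instead of A's left-to-right emit pass with a
-- modulo-cycled key cursor (alternative decomposition; same asymptotic cost).


-- ===== PORT A =====
-- A's loop: one pass, x counts alphabetic chars so far, key indexed by x % len(key).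
-- key[x % len(key)]: x ≥ 0 and (inside Pre_) len(key) > 0, so Python's % is Nat mod and the
-- index is in range; the .getD ' ' default is unreachable inside Pre_.
def inputKeyGoA (k : List Char) : List Char → Nat → List Char
  | [], _ => []
  | c :: rest, x =>
    if PySem.Chars.isalpha c then
      (PySem.List.pyGet? k ((x % k.length : Nat) : Int)).getD ' ' :: inputKeyGoA k rest (x + 1)
    else
      ' ' :: inputKeyGoA k rest x

def input_key (message : String) (key : String) : String :=
  String.ofList (inputKeyGoA key.toList message.toList 0)

-- ===== PORT B =====
-- out[pos] = kc: pos comes from enumerate, so 0 ≤ pos < len(out) and Python's item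
-- assignment is exactly List.set at pos.toNat (no negative wrap, no IndexError reachable).
-- -(-n // len(key)) is ceiling division; it is Python's ZeroDivisionError on an empty key,
-- reached only when positions ≠ [] — exactly the inputs Pre_ excludes.
def input_key_alt (message : String) (key : String) : String :=
  let ms := message.toList
  let positions := ((PySem.List.enumerate ms 0).filter (fun p => PySem.Chars.isalpha p.2)).map Prod.fst
  let out := List.replicate ms.length ' '
  if positions = [] then String.ofList out
  else
    let reps := -(PySem.Int.floordiv (-(positions.length : Int)) (key.toList.length : Int))
    let stream := (List.replicate reps.toNat key.toList).flatten
    String.ofList ((positions.zip stream).foldl (fun o pc => o.set pc.1.toNat pc.2) out)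

-- ===== PRECONDITION & SPEC =====
-- Pre_ excludes an empty key combined with a message containing an alphabetic character:
-- there Python A raises ZeroDivisionError (x % len(key) with len(key) = 0), and B raises
-- ZeroDivisionError there too (the ceiling division by len(key)).
def Pre_input_key (message : String) (key : String) : Prop :=
  key ≠ "" ∨ message.toList.all (fun c => !PySem.Chars.isalpha c) = true
instance (message : String) (key : String) : Decidable (Pre_input_key message key) := by
  unfold Pre_input_key; infer_instance
def pvWitness_input_key : String × String := ("Attack at dawn!", "key")

def Spec_input_key (message : String) (key : String) (out : String) : Prop := out = input_key_alt message key
instance (message : String) (key : String) (out : String) : Decidable (Spec_input_key message key out) := by unfold Spec_input_key; infer_instance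

-- ===== CLAIM (what is proved, stated in full; the proofs are below) =====
def Claim_equal_input_key : Prop := ∀ (message : String) (key : String), Dom_input_key message key → Pre_input_key message key → Spec_input_key message key (input_key message key)

-- ===== LEMMAS AND PROOFS =====

-- number of alphabetic characters seen so far
def pvCnt (ms : List Char) : Nat := (ms.filter PySem.Chars.isalpha).length

-- B's alpha-index list (the enumerate-filter-map comprehension, with general start)
def pvPos (ms : List Char) (s : Int) : List Int :=
  ((PySem.List.enumerate ms s).filter (fun p => PySem.Chars.isalpha p.2)).map Prod.fst

lemma pvPos_cons (c : Char) (rest : List Char) (s : Int) :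
    pvPos (c :: rest) s
      = (if PySem.Chars.isalpha c then [s] else []) ++ pvPos rest (s + 1) := by
  by_cases hc : PySem.Chars.isalpha c
  · simp [pvPos, PySem.List.enumerate_cons, hc]
  · simp [pvPos, PySem.List.enumerate_cons, hc]

lemma pvPos_bounds (ms : List Char) (s : Int) :
    ∀ p ∈ pvPos ms s, s ≤ p ∧ p < s + ms.length := by
  induction ms generalizing s with
  | nil => simp [pvPos]
  | cons c rest ih =>
    intro p hp
    rw [pvPos_cons] at hp
    rcases List.mem_append.mp hp with h | h
    · rcases (by split_ifs at h <;> simp_all : p = s) with rfl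
      simp only [List.length_cons]
      omega
    · have := ih (s + 1) p h
      simp only [List.length_cons]
      omega

lemma pvCnt_cons (c : Char) (rest : List Char) :
    pvCnt (c :: rest) = (if PySem.Chars.isalpha c then 1 else 0) + pvCnt rest := by
  by_cases hc : PySem.Chars.isalpha c <;> simp [pvCnt, List.filter_cons, hc] <;> omega

lemma pvPos_length (ms : List Char) (s : Int) :
    (pvPos ms s).length = pvCnt ms := by
  induction ms generalizing s with
  | nil => simp [pvPos, pvCnt]
  | cons c rest ih =>
    rw [pvPos_cons, pvCnt_cons]
    by_cases hc : PySem.Chars.isalpha c <;> simp [hc, ih (s + 1)] <;> try omega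

-- find? over the zipped (positions, stream) pairs: the entry written at absolute index s + i
lemma pvFind_zip (ms : List Char) (s : Int) (stream : List Char) (i : Nat)
    (hi : i < ms.length) (hlen : pvCnt ms ≤ stream.length) :
    ((pvPos ms s).zip stream).find? (fun pc => pc.1 == (s + i : Int))
      = if PySem.Chars.isalpha ms[i] then
          some (s + i, (stream[pvCnt (ms.take i)]?).getD ' ')
        else none := by
  induction ms generalizing s stream i with
  | nil => simp at hi
  | cons c rest ih =>
    rw [pvPos_cons]
    by_cases hc : PySem.Chars.isalpha c
    · obtain ⟨d, stream', rfl⟩ : ∃ d t, stream = d :: t := by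
        cases stream with
        | nil => rw [pvCnt_cons] at hlen; simp [hc] at hlen
        | cons d t => exact ⟨d, t, rfl⟩
      rw [if_pos hc]
      cases i with
      | zero =>
        simp only [List.cons_append, List.nil_append, List.zip_cons_cons, List.find?_cons]
        have h0 : (s + ((0:Nat):Int)) = s := by push_cast; ring
        simp [h0, hc, pvCnt]
      | succ j =>
        simp only [List.cons_append, List.nil_append, List.zip_cons_cons, List.find?_cons]
        have hne : ((s, d).1 == (s + ((j+1:Nat)) : Int)) = false := by
          simp; omega
        rw [hne]
        have hj : j < rest.length := by simp only [List.length_cons] at hi; omega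
        have hlen' : pvCnt rest ≤ stream'.length := by
          rw [pvCnt_cons, if_pos hc] at hlen
          simp only [List.length_cons] at hlen; omega
        have hrec := ih (s + 1) stream' j hj hlen'
        have hs : (s + 1 + (j:Nat) : Int) = s + ((j+1:Nat) : Int) := by push_cast; ring
        rw [hs] at hrec
        rw [hrec]
        by_cases ha : PySem.Chars.isalpha rest[j]
        · simp [ha, List.take_succ_cons, pvCnt_cons, hc, Nat.add_comm]
        · simp [ha]
    · rw [if_neg hc, List.nil_append]
      cases i with
      | zero =>
        simp only [List.getElem_cons_zero]
        rw [if_neg hc]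
        apply List.find?_eq_none.mpr
        intro pc hpc
        have hp1 := (pvPos_bounds rest (s + 1) pc.1 (List.of_mem_zip hpc).1).1
        simp; omega
      | succ j =>
        have hj : j < rest.length := by simp only [List.length_cons] at hi; omega
        have hlen' : pvCnt rest ≤ stream.length := by
          rw [pvCnt_cons, if_neg hc] at hlen; omega
        have hrec := ih (s + 1) stream j hj hlen'
        have hs : (s + 1 + (j:Nat) : Int) = s + ((j+1:Nat) : Int) := by push_cast; ring
        rw [hs] at hrec
        rw [hrec]
        by_cases ha : PySem.Chars.isalpha rest[j]
        · simp [ha, List.take_succ_cons, pvCnt_cons, hc]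
        · simp [ha]

-- the scatter fold preserves length
lemma pvScatter_length (l : List (Int × Char)) (out : List Char) :
    (l.foldl (fun o pc => o.set pc.1.toNat pc.2) out).length = out.length := by
  induction l generalizing out with
  | nil => rfl
  | cons p rest ih => simp [List.foldl_cons, ih]

-- indexing the scatter fold: the first pair keyed i wins; untouched indices keep out
lemma pvScatter_get (l : List (Int × Char)) (out : List Char) (i : Nat)
    (hi : i < out.length)
    (hnd : l.Pairwise (fun p q => p.1 < q.1)) (hb : ∀ pc ∈ l, 0 ≤ pc.1) :
    (l.foldl (fun o pc => o.set pc.1.toNat pc.2) out)[i]? =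
      match l.find? (fun pc => pc.1 == (i : Int)) with
      | some pc => some pc.2
      | none => out[i]? := by
  induction l generalizing out with
  | nil => simp
  | cons p rest ih =>
    have hp0 : 0 ≤ p.1 := hb p (List.mem_cons_self)
    have hnd' := (List.pairwise_cons.mp hnd).2
    have hgt := (List.pairwise_cons.mp hnd).1
    simp only [List.foldl_cons, List.find?_cons]
    by_cases hpi : p.1 = (i : Int)
    · rw [show (p.1 == (i:Int)) = true from by simp [hpi]]
      have hrest : rest.find? (fun pc => pc.1 == (i : Int)) = none := by
        apply List.find?_eq_none.mpr
        intro pc hpc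
        have := hgt pc hpc
        simp; omega
      rw [ih (out.set p.1.toNat p.2) (by simpa using hi) hnd'
        (fun pc h => hb pc (List.mem_cons_of_mem _ h)), hrest]
      have hti : p.1.toNat = i := by omega
      rw [hti, List.getElem?_set_self]
      simp [hi]
    · rw [show (p.1 == (i:Int)) = false from by simp [hpi]]
      rw [ih (out.set p.1.toNat p.2) (by simpa using hi) hnd'
        (fun pc h => hb pc (List.mem_cons_of_mem _ h))]
      have hti : p.1.toNat ≠ i := by omega
      rw [List.getElem?_set_ne hti]

lemma pvPos_pairwise (ms : List Char) (s : Int) :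
    (pvPos ms s).Pairwise (· < ·) := by
  induction ms generalizing s with
  | nil => simp [pvPos]
  | cons c rest ih =>
    rw [pvPos_cons]
    by_cases hc : PySem.Chars.isalpha c
    · rw [if_pos hc]
      refine List.pairwise_cons.mpr ⟨?_, ih (s + 1)⟩
      intro p hp
      have := (pvPos_bounds rest (s + 1) p hp).1
      omega
    · rw [if_neg hc, List.nil_append]; exact ih (s + 1)

-- pairwise order transfers from the left list to the zip
lemma pvZip_pairwise {A B : Type} (l : List A) (s : List B)
    (r : A → A → Prop) (h : l.Pairwise r) :
    (l.zip s).Pairwise (fun p q => r p.1 q.1) := by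
  induction l generalizing s with
  | nil => simp
  | cons a l ih =>
    cases s with
    | nil => simp
    | cons b s =>
      rw [List.zip_cons_cons]
      refine List.pairwise_cons.mpr ⟨?_, ih s (List.pairwise_cons.mp h).2⟩
      intro q hq
      exact (List.pairwise_cons.mp h).1 q.1 (List.of_mem_zip hq).1

-- flatten of replicated k, indexed below m * |k|, is k cycled
lemma inputKey_flatten_replicate_get (k : List Char) (m j : Nat)
    (hk : 0 < k.length) (h : j < m * k.length) :
    ((List.replicate m k).flatten)[j]? = k[j % k.length]? := by
  induction m generalizing j with
  | zero => omega
  | succ m ih =>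
    simp only [List.replicate_succ, List.flatten_cons]
    by_cases hj : j < k.length
    · rw [List.getElem?_append_left hj, Nat.mod_eq_of_lt hj]
    · rw [List.getElem?_append_right (by omega)]
      have h2 : j - k.length < m * k.length := by
        have hs : (m + 1) * k.length = m * k.length + k.length := by ring
        omega
      rw [ih _ h2]
      congr 1
      exact (Nat.mod_eq_sub_mod (by omega)).symm

-- length and per-index value of A's pass
lemma pvGoA_length (k ms : List Char) (x : Nat) :
    (inputKeyGoA k ms x).length = ms.length := by
  induction ms generalizing x with
  | nil => rfl
  | cons c rest ih =>
    by_cases hc : PySem.Chars.isalpha c <;> simp [inputKeyGoA, hc, ih]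

lemma pvGoA_get (k : List Char) (hk : 0 < k.length) (ms : List Char) (x i : Nat)
    (hi : i < ms.length) :
    (inputKeyGoA k ms x)[i]? =
      some (if PySem.Chars.isalpha ms[i] then
              (k[(x + pvCnt (ms.take i)) % k.length]?).getD ' ' else ' ') := by
  induction ms generalizing x i with
  | nil => simp at hi
  | cons c rest ih =>
    by_cases hc : PySem.Chars.isalpha c
    · cases i with
      | zero =>
        simp only [inputKeyGoA, if_pos hc, List.getElem?_cons_zero, List.getElem_cons_zero,
          List.take_zero]
        rw [PySem.List.pyGet?_natCast]
        have hlt : x % k.length < k.length := Nat.mod_lt _ hk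
        simp [hc, pvCnt, List.getElem?_eq_getElem hlt]
      | succ j =>
        simp only [inputKeyGoA, if_pos hc, List.getElem?_cons_succ, List.getElem_cons_succ]
        rw [ih (x + 1) j (by simpa using hi)]
        have : x + 1 + pvCnt (rest.take j) = x + pvCnt ((c :: rest).take (j + 1)) := by
          simp [pvCnt, hc]; omega
        rw [this]
        rfl
    · cases i with
      | zero =>
        simp [inputKeyGoA, hc]
      | succ j =>
        simp only [inputKeyGoA, if_neg hc, List.getElem?_cons_succ, List.getElem_cons_succ]
        rw [ih x j (by simpa using hi)]
        have : pvCnt (rest.take j) = pvCnt ((c :: rest).take (j + 1)) := by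
          simp [pvCnt, hc]
        rw [this]
        rfl

-- with no alphabetic characters A emits only spaces
lemma inputKey_goA_all_nonalpha (k ms : List Char) (x : Nat)
    (h : ∀ c ∈ ms, PySem.Chars.isalpha c = false) :
    inputKeyGoA k ms x = List.replicate ms.length ' ' := by
  induction ms generalizing x with
  | nil => rfl
  | cons c rest ih =>
    have hc := h c (List.mem_cons_self)
    simp only [inputKeyGoA, hc, Bool.false_eq_true, if_false, List.length_cons,
      List.replicate_succ]
    exact congrArg _ (ih _ fun d hd => h d (List.mem_cons_of_mem _ hd))

-- ===== VERDICT (by name: the statement is the Claim_ definition above) =====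
theorem input_key_spec : Claim_equal_input_key := by
  intro message key _ hpre
  unfold Spec_input_key input_key input_key_alt
  simp only []
  set ms := message.toList with hms
  set k := key.toList with hk
  have hposdef : ((PySem.List.enumerate ms 0).filter (fun p => PySem.Chars.isalpha p.2)).map
      Prod.fst = pvPos ms 0 := rfl
  rw [hposdef]
  by_cases h0 : pvPos ms 0 = []
  · rw [if_pos h0]
    have hn : pvCnt ms = 0 := by rw [← pvPos_length ms 0, h0]; rfl
    have hall : ∀ c ∈ ms, PySem.Chars.isalpha c = false := by
      intro c hc
      by_contra hcc
      have : c ∈ ms.filter PySem.Chars.isalpha :=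
        List.mem_filter.mpr ⟨hc, by revert hcc; cases PySem.Chars.isalpha c <;> simp⟩
      have hpos := List.length_pos_of_mem this
      simp only [pvCnt, List.length_eq_zero_iff] at hn
      simp [hn] at hpos
    rw [inputKey_goA_all_nonalpha k ms 0 hall]
  · rw [if_neg h0]
    set n := pvCnt ms with hn
    have hnpos : 0 < n := by
      have := pvPos_length ms 0
      have hlp := List.length_pos_of_ne_nil h0
      omega
    have hkpos : 0 < k.length := by
      rcases hpre with hke | hna
      · have : k ≠ [] := fun h => hke (String.toList_eq_nil_iff.mp h)
        exact List.length_pos_of_ne_nil this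
      · exfalso
        have : ms.filter PySem.Chars.isalpha = [] := by
          apply List.filter_eq_nil_iff.mpr
          intro c hc
          have := List.all_eq_true.mp hna c hc
          revert this; cases PySem.Chars.isalpha c <;> simp
        have h0 : pvCnt ms = 0 := by simp [pvCnt, this]
        omega
    set reps := -(PySem.Int.floordiv (-((pvPos ms 0).length : Int)) (k.length : Int)) with hreps
    have hposlen : (pvPos ms 0).length = n := pvPos_length ms 0
    have hceil : ((reps - 1) * k.length < (n:Int) ∧ (n:Int) ≤ reps * k.length) := by
      have := (PySem.Int.neg_floordiv_neg_eq_iff_of_pos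
        (a := ((pvPos ms 0).length : Int)) (b := (k.length : Int)) (q := reps)
        (by exact_mod_cast hkpos)).mp rfl
      rw [hposlen] at this; exact this
    have hrpos : 0 < reps := by nlinarith [hceil.1, hceil.2, hnpos, hkpos]
    have hbound : n ≤ reps.toNat * k.length := by
      have h2 := hceil.2
      have : (n : Int) ≤ (reps.toNat : Int) * k.length := by
        rw [Int.toNat_of_nonneg (le_of_lt hrpos)]; exact h2
      exact_mod_cast this
    set stream := (List.replicate reps.toNat k).flatten with hstream
    have hstreamlen : stream.length = reps.toNat * k.length := by
      simp [hstream]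
    apply congrArg String.ofList
    apply List.ext_getElem?
    intro i
    by_cases hi : i < ms.length
    · rw [pvGoA_get k hkpos ms 0 i hi]
      rw [pvScatter_get _ _ i
        (by simpa using hi)
        (pvZip_pairwise _ _ _ (pvPos_pairwise ms 0))
        (by
          intro pc hpc
          exact (pvPos_bounds ms 0 pc.1 (List.of_mem_zip hpc).1).1)]
      have hfind := pvFind_zip ms 0 stream i hi (by rw [hstreamlen]; exact hbound)
      simp only [zero_add] at hfind
      rw [hfind]
      by_cases ha : PySem.Chars.isalpha ms[i]
      · rw [if_pos ha, if_pos ha]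
        have hcnt_lt : pvCnt (ms.take i) < n := by
          have hsplit : pvCnt ms = pvCnt (ms.take i) + pvCnt (ms.drop i) := by
            simp only [pvCnt]
            rw [← List.length_append, ← List.filter_append, List.take_append_drop]
          have hdrop : 0 < pvCnt (ms.drop i) := by
            have hmem : ms[i] ∈ ms.drop i := by
              refine List.mem_iff_getElem.mpr ⟨0, by simp; omega, ?_⟩
              simp
            have hmf : ms[i] ∈ (ms.drop i).filter PySem.Chars.isalpha :=
              List.mem_filter.mpr ⟨hmem, ha⟩
            exact List.length_pos_of_mem hmf
          omega
        have hjlt : pvCnt (ms.take i) < stream.length := by omega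
        have : stream[pvCnt (ms.take i)]? = k[pvCnt (ms.take i) % k.length]? := by
          rw [hstream]
          exact inputKey_flatten_replicate_get k reps.toNat _ hkpos (by omega)
        rw [this]
        simp
      · rw [if_neg ha, if_neg ha]
        simp [hi]
    · have h1 : (inputKeyGoA k ms 0).length ≤ i := by rw [pvGoA_length]; omega
      have h2 : (((pvPos ms 0).zip stream).foldl (fun o pc => o.set pc.1.toNat pc.2)
          (List.replicate ms.length ' ')).length ≤ i := by
        rw [pvScatter_length]; simp; omega
      rw [List.getElem?_eq_none h1, List.getElem?_eq_none h2]
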